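-- pv_equiv track=rewrite | github.com/hanschurer/CodingWithMinmer | 249_group_shifted_strings/python/variant_249_rotational_cipher.py | create_rotational_cipher_table
-- ===== SOURCE A (Python) =====
-- def create_rotational_cipher_table(rotation_factor: int) -> dict:
--     """
--     创建旋转密码对照表
--
--     Args:
--         rotation_factor: 旋转因子
--
--     Returns:
--         字符映射字典
--     """
--     cipher_table = {}
--
--     # 小写字母映射
--     for i in range(26):
--         original = chr(ord('a') + i)
--         shifted = chr((i + rotation_factor) % 26 + ord('a'))
--         cipher_table[original] = shifted
--
--     # 大写字母映射
--     for i in range(26):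
--         original = chr(ord('A') + i)
--         shifted = chr((i + rotation_factor) % 26 + ord('A'))
--         cipher_table[original] = shifted
--
--     # 数字映射
--     for i in range(10):
--         original = chr(ord('0') + i)
--         shifted = chr((i + rotation_factor) % 10 + ord('0'))
--         cipher_table[original] = shifted
--
--     return cipher_table
-- ===== SOURCE B (Python) =====
-- def create_rotational_cipher_table(rotation_factor: int) -> dict:
--     """Build the same table by rotating each whole alphabet string and zipping."""
--     table = {}
--     for S, m in (('abcdefghijklmnopqrstuvwxyz', 26),
--                  ('ABCDEFGHIJKLMNOPQRSTUVWXYZ', 26),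
--                  ('0123456789', 10)):
--         r = rotation_factor % m
--         table.update(zip(S, S[r:] + S[:r]))
--     return table
-- ===== Notes on version B (the rewrite author's own statement) =====
-- stated objective: idiomatic
-- what changed: Instead of three explicit index loops computing chr((i+rotation)%m + base) per character, B reduces the rotation once per alphabet, rotates the whole alphabet string by slicing (S[r:] + S[:r]) and builds the mapping with dict.update(zip(S, rotated)).
import Mathlib
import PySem

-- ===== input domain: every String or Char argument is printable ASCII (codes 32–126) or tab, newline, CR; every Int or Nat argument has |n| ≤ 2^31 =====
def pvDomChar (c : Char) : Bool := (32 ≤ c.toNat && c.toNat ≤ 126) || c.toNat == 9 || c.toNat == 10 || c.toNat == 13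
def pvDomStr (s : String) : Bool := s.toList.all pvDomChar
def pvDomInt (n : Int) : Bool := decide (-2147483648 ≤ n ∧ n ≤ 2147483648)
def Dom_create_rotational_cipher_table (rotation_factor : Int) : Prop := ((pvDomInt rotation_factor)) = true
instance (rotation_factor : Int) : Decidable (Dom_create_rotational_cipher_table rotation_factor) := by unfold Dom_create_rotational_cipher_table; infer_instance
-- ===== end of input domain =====

-- B builds the table by rotating each whole alphabet string with slices and zipping,
-- instead of A's per-index chr/ord modular arithmetic; same result, more idiomatic.

-- ===== PORT A =====
-- one 'for i in range(n): cipher_table[chr(base+i)] = chr((i+r) % m + base)' loop;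
-- chr/ord ported by hand as Char.ofNat / the literal code point (exact here: all codes lie in 48..122)
def pvALoop (base m n rotation_factor : Int) (d : PySem.Dict String String) : PySem.Dict String String :=
  (PySem.List.pyRange 0 n 1).foldl (fun d i =>
    d.insert (String.ofList [Char.ofNat (base + i).toNat])
             (String.ofList [Char.ofNat ((PySem.Int.mod (i + rotation_factor) m) + base).toNat])) d

def create_rotational_cipher_table (rotation_factor : Int) : List (String × String) :=
  (pvALoop 48 10 10 rotation_factor
    (pvALoop 65 26 26 rotation_factor
      (pvALoop 97 26 26 rotation_factor PySem.Dict.empty))).items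

-- ===== PORT B =====
-- one iteration of B's loop body: r = rotation_factor % m; table.update(zip(S, S[r:] + S[:r]))
def pvBlock (rotation_factor : Int) (d : PySem.Dict String String) (Sm : String × Int) :
    PySem.Dict String String :=
  let r := PySem.Int.mod rotation_factor Sm.2
  let cs := Sm.1.toList
  let rotated := PySem.List.slice cs (some r) none ++ PySem.List.slice cs none (some r)
  (cs.zip rotated).foldl (fun d p => d.insert (String.ofList [p.1]) (String.ofList [p.2])) d

def create_rotational_cipher_table_alt (rotation_factor : Int) : List (String × String) :=
  ([("abcdefghijklmnopqrstuvwxyz", (26 : Int)), ("ABCDEFGHIJKLMNOPQRSTUVWXYZ", 26),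
    ("0123456789", 10)].foldl (pvBlock rotation_factor) PySem.Dict.empty).items

-- ===== PRECONDITION & SPEC =====
def Spec_create_rotational_cipher_table (rotation_factor : Int) (out : List (String × String)) : Prop := out = create_rotational_cipher_table_alt rotation_factor
instance (rotation_factor : Int) (out : List (String × String)) : Decidable (Spec_create_rotational_cipher_table rotation_factor out) := by unfold Spec_create_rotational_cipher_table; infer_instance

-- ===== CLAIM (what is proved, stated in full; the proofs are below) =====
def Claim_equal_create_rotational_cipher_table : Prop := ∀ (rotation_factor : Int), Dom_create_rotational_cipher_table rotation_factor → Spec_create_rotational_cipher_table rotation_factor (create_rotational_cipher_table rotation_factor)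

-- ===== LEMMAS AND PROOFS =====

-- folding key/value inserts equals folding pair inserts over the mapped pair list
theorem pv_ins_map {ι : Type} (key val : ι → String) (l : List ι) (d : PySem.Dict String String) :
    l.foldl (fun d i => d.insert (key i) (val i)) d
    = (l.map (fun i => (key i, val i))).foldl (fun d p => d.insert p.1 p.2) d := by
  induction l generalizing d with
  | nil => rfl
  | cons x xs ih => simp [List.foldl, ih]

-- shifting the rotation by a multiple of m does not change (i + r) % m
theorem pv_mod_reduce (i rotation_factor m : Int) (hm : 0 < m) :
    PySem.Int.mod (i + rotation_factor) m = PySem.Int.mod (i + rotation_factor % m) m := by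
  rw [PySem.Int.mod_eq_emod_of_pos hm, PySem.Int.mod_eq_emod_of_pos hm,
    Int.add_emod i rotation_factor, Int.add_emod i (rotation_factor % m),
    Int.emod_emod_of_dvd rotation_factor dvd_rfl]

-- char-level block equalities, one per alphabet, over all residues
theorem pv_block26 (base : Int) (hb : base = 97 ∨ base = 65) : ∀ a : Nat, a < 26 →
    (PySem.List.pyRange 0 26 1).map (fun i =>
        (Char.ofNat (base + i).toNat, Char.ofNat ((PySem.Int.mod (i + (a : Int)) 26) + base).toNat))
    = ((PySem.List.pyRange 0 26 1).map (fun i => Char.ofNat (base + i).toNat)).zip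
      (PySem.List.slice ((PySem.List.pyRange 0 26 1).map (fun i => Char.ofNat (base + i).toNat)) (some (a : Int)) none
       ++ PySem.List.slice ((PySem.List.pyRange 0 26 1).map (fun i => Char.ofNat (base + i).toNat)) none (some (a : Int))) := by
  rcases hb with h | h
  · subst h; decide
  · subst h; decide

theorem pv_block10 : ∀ a : Nat, a < 10 →
    (PySem.List.pyRange 0 10 1).map (fun i =>
        (Char.ofNat (48 + i).toNat, Char.ofNat ((PySem.Int.mod (i + (a : Int)) 10) + 48).toNat))
    = "0123456789".toList.zip
      (PySem.List.slice "0123456789".toList (some (a : Int)) none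
       ++ PySem.List.slice "0123456789".toList none (some (a : Int))) := by
  decide

theorem pv_lower : "abcdefghijklmnopqrstuvwxyz".toList
    = (PySem.List.pyRange 0 26 1).map (fun i => Char.ofNat ((97 : Int) + i).toNat) := by decide
theorem pv_upper : "ABCDEFGHIJKLMNOPQRSTUVWXYZ".toList
    = (PySem.List.pyRange 0 26 1).map (fun i => Char.ofNat ((65 : Int) + i).toNat) := by decide

-- a whole block of A equals the corresponding block of B, as the pair list folded in
theorem pv_pairs_eq (base m : Int) (S : String) (rotation_factor : Int) (hm : 0 < m)
    (hblk : ∀ a : Nat, a < m.toNat →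
      (PySem.List.pyRange 0 m 1).map (fun i =>
          (Char.ofNat (base + i).toNat, Char.ofNat ((PySem.Int.mod (i + (a : Int)) m) + base).toNat))
      = S.toList.zip
        (PySem.List.slice S.toList (some (a : Int)) none
         ++ PySem.List.slice S.toList none (some (a : Int)))) :
    (PySem.List.pyRange 0 m 1).map (fun i =>
        (String.ofList [Char.ofNat (base + i).toNat],
         String.ofList [Char.ofNat ((PySem.Int.mod (i + rotation_factor) m) + base).toNat]))
    = (S.toList.zip
        (PySem.List.slice S.toList (some (PySem.Int.mod rotation_factor m)) none
         ++ PySem.List.slice S.toList none (some (PySem.Int.mod rotation_factor m)))).map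
        (fun p => (String.ofList [p.1], String.ofList [p.2])) := by
  have hnn : 0 ≤ rotation_factor % m := Int.emod_nonneg rotation_factor (ne_of_gt hm)
  have hlt := Int.emod_lt_of_pos rotation_factor hm
  have ha1 : PySem.Int.mod rotation_factor m = rotation_factor % m :=
    PySem.Int.mod_eq_emod_of_pos hm
  set a : Nat := (rotation_factor % m).toNat with hadef
  have ha2 : rotation_factor % m = (a : Int) := by omega
  have haux : a < m.toNat := by omega
  have h1 : (fun i => (Char.ofNat (base + i).toNat,
        Char.ofNat ((PySem.Int.mod (i + rotation_factor) m) + base).toNat))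
      = (fun i => (Char.ofNat (base + i).toNat,
        Char.ofNat ((PySem.Int.mod (i + (a : Int)) m) + base).toNat)) := by
    funext i
    rw [pv_mod_reduce i rotation_factor m hm, ha2]
  calc (PySem.List.pyRange 0 m 1).map (fun i =>
        (String.ofList [Char.ofNat (base + i).toNat],
         String.ofList [Char.ofNat ((PySem.Int.mod (i + rotation_factor) m) + base).toNat]))
      = ((PySem.List.pyRange 0 m 1).map (fun i =>
          (Char.ofNat (base + i).toNat,
           Char.ofNat ((PySem.Int.mod (i + rotation_factor) m) + base).toNat))).map
          (fun p => (String.ofList [p.1], String.ofList [p.2])) := by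
        rw [List.map_map]; rfl
    _ = (S.toList.zip
          (PySem.List.slice S.toList (some (a : Int)) none
           ++ PySem.List.slice S.toList none (some (a : Int)))).map
          (fun p => (String.ofList [p.1], String.ofList [p.2])) := by
        rw [h1, hblk a haux]
    _ = _ := by rw [ha1, ha2]

-- ===== VERDICT (by name: the statement is the Claim_ definition above) =====
theorem create_rotational_cipher_table_spec : Claim_equal_create_rotational_cipher_table := by
  intro r _
  unfold Spec_create_rotational_cipher_table
  unfold create_rotational_cipher_table create_rotational_cipher_table_alt pvALoop pvBlock
  simp only [List.foldl]
  rw [pv_ins_map (fun i : Int => String.ofList [Char.ofNat ((97 : Int) + i).toNat])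
        (fun i => String.ofList [Char.ofNat ((PySem.Int.mod (i + r) 26) + 97).toNat]),
      pv_ins_map (fun i : Int => String.ofList [Char.ofNat ((65 : Int) + i).toNat])
        (fun i => String.ofList [Char.ofNat ((PySem.Int.mod (i + r) 26) + 65).toNat]),
      pv_ins_map (fun i : Int => String.ofList [Char.ofNat ((48 : Int) + i).toNat])
        (fun i => String.ofList [Char.ofNat ((PySem.Int.mod (i + r) 10) + 48).toNat]),
      pv_ins_map (fun p : Char × Char => String.ofList [p.1]) (fun p => String.ofList [p.2]),
      pv_ins_map (fun p : Char × Char => String.ofList [p.1]) (fun p => String.ofList [p.2]),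
      pv_ins_map (fun p : Char × Char => String.ofList [p.1]) (fun p => String.ofList [p.2])]
  rw [pv_pairs_eq 97 26 "abcdefghijklmnopqrstuvwxyz" r (by norm_num)
        (by intro a ha; rw [pv_lower]; exact pv_block26 97 (Or.inl rfl) a (by omega)),
      pv_pairs_eq 65 26 "ABCDEFGHIJKLMNOPQRSTUVWXYZ" r (by norm_num)
        (by intro a ha; rw [pv_upper]; exact pv_block26 65 (Or.inr rfl) a (by omega)),
      pv_pairs_eq 48 10 "0123456789" r (by norm_num)
        (by intro a ha; exact pv_block10 a (by omega))]
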